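-- pv_equiv track=rewrite | github.com/okoks9011/problem_solving | codejam_kickstart/2018_round_e/yogurt.py | maximum_yogurt
-- ===== SOURCE A (Python) =====
-- def maximum_yogurt(n, k, A):
--     A.sort()
--
--     day = 0
--     i = 0
--     eaten = 0
--     while i < n:
--         while i < n and A[i] <= day:
--             i += 1
--         today = min(k, n - i)
--         eaten += today
--         i += today
--         day += 1
--     return eaten
-- ===== SOURCE B (Python) =====
-- def maximum_yogurt(n, k, A):
--     A.sort()
--     day = 0
--     today = 0
--     eaten = 0
--     for idx in range(n):
--         a = A[idx]
--         if today == k: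
--             day += 1
--             today = 0
--         if day < a and today < k:
--             eaten += 1
--             today += 1
--     return eaten
-- ===== Notes on version B (the rewrite author's own statement) =====
-- stated objective: simpler
-- what changed: Replaces A's day-batch simulation (outer day loop with an inner spoilage-skip while and min(k,n-i) batch pointer arithmetic) by a single element-by-element pass over the sorted list that maintains day/today/eaten counters, advancing the day lazily when today reaches k; B sorts A in place exactly like A.
-- outside the precondition, e.g. on maximum_yogurt(4, 4, [1]): A returns 4, B raises IndexError
import Mathlib
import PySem

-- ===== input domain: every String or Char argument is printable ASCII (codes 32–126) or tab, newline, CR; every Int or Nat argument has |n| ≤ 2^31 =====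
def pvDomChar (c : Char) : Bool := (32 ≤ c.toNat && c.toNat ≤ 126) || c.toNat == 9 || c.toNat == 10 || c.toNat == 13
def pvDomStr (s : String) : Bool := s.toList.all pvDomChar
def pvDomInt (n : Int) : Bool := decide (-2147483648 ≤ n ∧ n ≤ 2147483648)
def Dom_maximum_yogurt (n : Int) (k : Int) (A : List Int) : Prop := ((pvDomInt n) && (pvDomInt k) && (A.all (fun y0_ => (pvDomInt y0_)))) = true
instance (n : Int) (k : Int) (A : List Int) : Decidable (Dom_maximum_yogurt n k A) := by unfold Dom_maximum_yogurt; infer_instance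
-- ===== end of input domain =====

-- B replaces A's day-batch loop (inner spoilage-skip while + min(k,n-i) batch arithmetic) by a
-- single per-element pass with day/today/eaten counters; objective: simpler. Both sort A in place
-- (identical side effect); the equivalence proved is about the return value.


-- ===== PORT A =====
-- inner `while i < n and A[i] <= day: i += 1`
def pvSkip (n day : Int) (L : List Int) (i : Int) : Int :=
  if h : i < n ∧ PySem.List.pyGetD L i 0 ≤ day then pvSkip n day L (i + 1) else i
termination_by (n - i).toNat
decreasing_by omega

-- outer `while i < n: …`; the Nat fuel is a totality guard only (Python A diverges for k < 0,
-- excluded by Pre_); within Pre_ ∩ Dom the loop exits before the fuel does (proved below)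
def pvOuter (n k : Int) (L : List Int) : Nat → Int → Int → Int → Int
  | 0, _, _, eaten => eaten
  | fuel + 1, i, day, eaten =>
    if i < n then
      let i1 := pvSkip n day L i
      let today := min k (n - i1)
      pvOuter n k L fuel (i1 + today) (day + 1) (eaten + today)
    else eaten

def maximum_yogurt (n : Int) (k : Int) (A : List Int) : Int :=
  pvOuter n k (PySem.List.sorted A (fun x => x) false) (2 ^ 33 + n.toNat) 0 0 0

-- ===== PORT B =====
def maximum_yogurt_alt (n : Int) (k : Int) (A : List Int) : Int :=
  let L := PySem.List.sorted A (fun x => x) false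
  let s := (PySem.List.pyRange 0 n 1).foldl
    (fun (st : Int × Int × Int) idx =>
      let a := PySem.List.pyGetD L idx 0
      let day := if st.2.1 = k then st.1 + 1 else st.1
      let today := if st.2.1 = k then 0 else st.2.1
      if day < a ∧ today < k then (day, today + 1, st.2.2 + 1) else (day, today, st.2.2))
    (0, 0, 0)
  s.2.2

-- ===== PRECONDITION & SPEC =====
-- Pre_ excludes the inputs where Python A misbehaves: k < 0 with 0 < n (A's loop never
-- terminates), and n > len(A) with 0 < n, where A either raises IndexError or (when the batch
-- arithmetic jumps i past the end) returns an overcount of yogurts that do not exist, while B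
-- itself raises IndexError there.
def Pre_maximum_yogurt (n : Int) (k : Int) (A : List Int) : Prop :=
  n ≤ 0 ∨ (0 ≤ k ∧ n ≤ (A.length : Int))
instance (n : Int) (k : Int) (A : List Int) : Decidable (Pre_maximum_yogurt n k A) := by
  unfold Pre_maximum_yogurt; infer_instance

def pvWitness_maximum_yogurt : Int × Int × List Int := (3, 1, [2, 1, 2])

def Spec_maximum_yogurt (n : Int) (k : Int) (A : List Int) (out : Int) : Prop := out = maximum_yogurt_alt n k A
instance (n : Int) (k : Int) (A : List Int) (out : Int) : Decidable (Spec_maximum_yogurt n k A out) := by unfold Spec_maximum_yogurt; infer_instance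

-- ===== CLAIM (what is proved, stated in full; the proofs are below) =====
def Claim_equal_maximum_yogurt : Prop := ∀ (n : Int) (k : Int) (A : List Int), Dom_maximum_yogurt n k A → Pre_maximum_yogurt n k A → Spec_maximum_yogurt n k A (maximum_yogurt n k A)

-- ===== LEMMAS AND PROOFS =====

-- B's loop, index-recursion form (proof helper; shown equal to the foldl in pvFold_eq)
def pvBLoop (n k : Int) (L : List Int) (i day today eaten : Int) : Int :=
  if h : i < n then
    let a := PySem.List.pyGetD L i 0
    let day2 := if today = k then day + 1 else day
    let today2 := if today = k then 0 else today
    if day2 < a ∧ today2 < k then pvBLoop n k L (i + 1) day2 (today2 + 1) (eaten + 1)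
    else pvBLoop n k L (i + 1) day2 today2 eaten
  else eaten
termination_by (n - i).toNat
decreasing_by all_goals omega

theorem pvFold_eq (n k : Int) (L : List Int) (i day today eaten : Int) :
    ((PySem.List.pyRange i n 1).foldl
      (fun (st : Int × Int × Int) idx =>
        let a := PySem.List.pyGetD L idx 0
        let day := if st.2.1 = k then st.1 + 1 else st.1
        let today := if st.2.1 = k then 0 else st.2.1
        if day < a ∧ today < k then (day, today + 1, st.2.2 + 1) else (day, today, st.2.2))
      (day, today, eaten)).2.2 = pvBLoop n k L i day today eaten := by
  rw [pvBLoop]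
  by_cases h : i < n
  · rw [PySem.List.pyRange_one_cons h, List.foldl_cons]
    simp only [dif_pos h]
    by_cases hc : (if today = k then day + 1 else day) < PySem.List.pyGetD L i 0 ∧
        (if today = k then 0 else today) < k
    · simp only [if_pos hc]
      exact pvFold_eq n k L (i + 1) _ _ _
    · simp only [if_neg hc]
      exact pvFold_eq n k L (i + 1) _ _ _
  · rw [PySem.List.pyRange_one_eq_nil (by omega), dif_neg h]
    rfl
termination_by (n - i).toNat
decreasing_by all_goals omega

theorem pvBLoop_notlt (n k : Int) (L : List Int) (i day today eaten : Int) (h : ¬ i < n) :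
    pvBLoop n k L i day today eaten = eaten := by
  rw [pvBLoop, dif_neg h]

theorem pvOuter_notlt (n k : Int) (L : List Int) (f : Nat) (i day eaten : Int) (h : ¬ i < n) :
    pvOuter n k L f i day eaten = eaten := by
  cases f <;> simp [pvOuter, h]

theorem pvSkip_ge (n day : Int) (L : List Int) (i : Int) : i ≤ pvSkip n day L i := by
  rw [pvSkip]
  split
  · have := pvSkip_ge n day L (i + 1); omega
  · omega
termination_by (n - i).toNat
decreasing_by omega

theorem pvSkip_le (n day : Int) (L : List Int) (i : Int) (h : i ≤ n) : pvSkip n day L i ≤ n := by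
  rw [pvSkip]
  split
  · exact pvSkip_le n day L (i + 1) (by omega)
  · exact h
termination_by (n - i).toNat
decreasing_by omega

theorem pvSkip_stop (n day : Int) (L : List Int) (i : Int) :
    ¬ (pvSkip n day L i < n ∧ PySem.List.pyGetD L (pvSkip n day L i) 0 ≤ day) := by
  rw [pvSkip]
  split
  · exact pvSkip_stop n day L (i + 1)
  · assumption
termination_by (n - i).toNat
decreasing_by omega

theorem pvSkip_prev (n day : Int) (L : List Int) (i j : Int) (h1 : i ≤ j)
    (h2 : j < pvSkip n day L i) : PySem.List.pyGetD L j 0 ≤ day := by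
  rw [pvSkip] at h2
  by_cases hc : i < n ∧ PySem.List.pyGetD L i 0 ≤ day
  · rw [dif_pos hc] at h2
    rcases eq_or_lt_of_le h1 with rfl | hlt
    · exact hc.2
    · exact pvSkip_prev n day L (i + 1) j (by omega) h2
  · rw [dif_neg hc] at h2; omega
termination_by (n - i).toNat
decreasing_by omega

theorem pvMono (L : List Int) (hs : L.Pairwise (· ≤ ·)) (p q : Int) (h0 : 0 ≤ p) (hpq : p ≤ q)
    (hq : q < (L.length : Int)) : PySem.List.pyGetD L p 0 ≤ PySem.List.pyGetD L q 0 := by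
  rw [PySem.List.pyGetD_eq_getElem L 0 h0 (by omega), PySem.List.pyGetD_eq_getElem L 0 (by omega) hq]
  rcases eq_or_lt_of_le hpq with rfl | hlt
  · exact le_refl _
  · exact (List.pairwise_iff_getElem.mp hs) p.toNat q.toNat (by omega) (by omega) (by omega)

theorem pvBLoop_zero (n : Int) (L : List Int) (i day eaten : Int) :
    pvBLoop n 0 L i day 0 eaten = eaten := by
  rw [pvBLoop]
  split
  · have := pvBLoop_zero n L (i + 1) (day + 1) eaten
    simpa using this
  · rfl
termination_by (n - i).toNat
decreasing_by omega

theorem pvBLoop_norm (n k : Int) (L : List Int) (hk : k ≠ 0) (i day eaten : Int) :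
    pvBLoop n k L i day k eaten = pvBLoop n k L i (day + 1) 0 eaten := by
  rw [pvBLoop, pvBLoop]
  split
  · simp [Ne.symm hk]
  · rfl

theorem pvBLoop_skip (n k : Int) (L : List Int) (hk : 1 ≤ k) (i i1 day eaten : Int)
    (hii : i ≤ i1) (hi1 : i1 ≤ n)
    (hle : ∀ j, i ≤ j → j < i1 → PySem.List.pyGetD L j 0 ≤ day) :
    pvBLoop n k L i day 0 eaten = pvBLoop n k L i1 day 0 eaten := by
  rcases eq_or_lt_of_le hii with rfl | hlt
  · rfl
  · rw [pvBLoop, dif_pos (by omega : i < n)]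
    have ha : ¬ ((if (0:Int) = k then day + 1 else day) < PySem.List.pyGetD L i 0 ∧
        (if (0:Int) = k then (0:Int) else 0) < k) := by
      have := hle i (le_refl i) hlt
      rw [if_neg (by omega : ¬ (0:Int) = k), if_neg (by omega : ¬ (0:Int) = k)]
      intro hcon; omega
    rw [if_neg ha]
    simp only [if_neg (by omega : ¬ (0:Int) = k)]
    exact pvBLoop_skip n k L hk (i + 1) i1 day eaten (by omega) hi1 (fun j h1 h2 => hle j (by omega) h2)
termination_by (i1 - i).toNat
decreasing_by omega

theorem pvBLoop_eat (n k : Int) (L : List Int) (day : Int) (c : Nat) :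
    ∀ (i today eaten : Int), 0 ≤ today → today + c ≤ k → i + c ≤ n →
    (∀ j, i ≤ j → j < i + c → day < PySem.List.pyGetD L j 0) →
    pvBLoop n k L i day today eaten = pvBLoop n k L (i + c) day (today + c) (eaten + c) := by
  induction c with
  | zero => intro i today eaten _ _ _ _; norm_num
  | succ m ih =>
    intro i today eaten h0 hck hin hfr
    rw [pvBLoop, dif_pos (by push_cast at hin ⊢; omega : i < n)]
    have hne : ¬ today = k := by push_cast at hck; omega
    simp only [if_neg hne]
    have hfi : day < PySem.List.pyGetD L i 0 := hfr i (le_refl i) (by push_cast; omega)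
    rw [if_pos ⟨hfi, by push_cast at hck; omega⟩]
    have := ih (i + 1) (today + 1) (eaten + 1) (by omega) (by push_cast at hck ⊢; omega)
      (by push_cast at hin ⊢; omega) (fun j h1 h2 => hfr j (by omega) (by push_cast at h2 ⊢; omega))
    rw [this]
    congr 1 <;> push_cast <;> ring

theorem pvOuter_zero_k (n M : Int) (L : List Int) (hn : n ≤ (L.length : Int))
    (hM : ∀ a ∈ L, a ≤ M) :
    ∀ (f : Nat) (i day eaten : Int), 0 ≤ i → day ≤ M + 1 → (n - i) + (M + 1 - day) < (f : Int) →
    pvOuter n 0 L f i day eaten = eaten := by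
  intro f
  induction f with
  | zero => intro i day eaten _ _ _; rfl
  | succ m ih =>
    intro i day eaten hi hday hf
    by_cases h : i < n
    · rw [pvOuter, if_pos h]
      dsimp only
      have hge := pvSkip_ge n day L i
      have hle := pvSkip_le n day L i (by omega)
      set i1 := pvSkip n day L i with hi1
      have htoday : min (0:Int) (n - i1) = 0 := by omega
      rw [htoday]
      by_cases h1 : i1 < n
      · have hv : day < PySem.List.pyGetD L i1 0 := by
          have := pvSkip_stop n day L i; rw [← hi1] at this; omega
        have hvM : PySem.List.pyGetD L i1 0 ≤ M := by
          have hmem : PySem.List.pyGetD L i1 0 ∈ L :=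
            PySem.List.pyGetD_mem L 0 (by constructor <;> omega)
          exact hM _ hmem
        have := ih (i1 + 0) (day + 1) (eaten + 0) (by omega) (by omega) (by push_cast at hf ⊢; omega)
        simpa using this
      · rw [pvOuter_notlt _ _ _ _ _ _ _ (by omega)]
        norm_num
    · rw [pvOuter, if_neg h]

theorem pvSim (n k M : Int) (L : List Int) (hk : 1 ≤ k) (hn : n ≤ (L.length : Int))
    (hs : L.Pairwise (· ≤ ·)) (hM : ∀ a ∈ L, a ≤ M) :
    ∀ (f : Nat) (i day eaten : Int), 0 ≤ i → day ≤ M + 1 → (n - i) + (M + 1 - day) < (f : Int) →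
    pvOuter n k L f i day eaten = pvBLoop n k L i day 0 eaten := by
  intro f
  induction f with
  | zero =>
    intro i day eaten hi hday hf
    have : ¬ i < n := by push_cast at hf; omega
    rw [pvBLoop_notlt _ _ _ _ _ _ _ this]; rfl
  | succ m ih =>
    intro i day eaten hi hday hf
    by_cases h : i < n
    · rw [pvOuter, if_pos h]
      dsimp only
      have hge := pvSkip_ge n day L i
      have hle := pvSkip_le n day L i (by omega)
      set i1 := pvSkip n day L i with hi1
      have hskip : pvBLoop n k L i day 0 eaten = pvBLoop n k L i1 day 0 eaten :=
        pvBLoop_skip n k L hk i i1 day eaten hge hle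
          (fun j h1 h2 => pvSkip_prev n day L i j h1 (by rw [← hi1]; exact h2))
      rw [hskip]
      by_cases h1 : i1 < n
      · have hv : day < PySem.List.pyGetD L i1 0 := by
          have := pvSkip_stop n day L i; rw [← hi1] at this; omega
        have hvM : PySem.List.pyGetD L i1 0 ≤ M := by
          have hmem : PySem.List.pyGetD L i1 0 ∈ L :=
            PySem.List.pyGetD_mem L 0 (by constructor <;> omega)
          exact hM _ hmem
        set t := min k (n - i1) with ht
        have ht0 : 1 ≤ t := by omega
        have htk : t ≤ k := by omega
        have htn : i1 + t ≤ n := by omega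
        have hfresh : ∀ j, i1 ≤ j → j < i1 + t → day < PySem.List.pyGetD L j 0 := by
          intro j hj1 hj2
          have := pvMono L hs i1 j (by omega) hj1 (by omega)
          omega
        have heat := pvBLoop_eat n k L day t.toNat i1 0 eaten (le_refl 0)
          (by omega) (by omega)
          (by intro j hj1 hj2; exact hfresh j hj1 (by omega))
        have hcast : ((t.toNat : Int)) = t := by omega
        rw [hcast] at heat
        simp only [zero_add] at heat
        rw [heat]
        by_cases h2 : i1 + t < n
        · have htk' : t = k := by omega
          rw [htk', pvBLoop_norm n k L (by omega) _ day _]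
          exact ih (i1 + k) (day + 1) (eaten + k) (by omega) (by omega) (by push_cast at hf ⊢; omega)
        · rw [pvBLoop_notlt _ _ _ _ _ _ _ h2,
            pvOuter_notlt _ _ _ _ _ _ _ (by omega)]
      · have htoday : min k (n - i1) = 0 := by omega
        rw [htoday, pvBLoop_notlt _ _ _ _ _ _ _ h1,
          pvOuter_notlt _ _ _ _ _ _ _ (by omega)]
        norm_num
    · rw [pvOuter, if_neg h, pvBLoop_notlt _ _ _ _ _ _ _ h]

-- ===== VERDICT (by name: the statement is the Claim_ definition above) =====
theorem maximum_yogurt_spec : Claim_equal_maximum_yogurt := by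
  intro n k A hdom hpre
  unfold Spec_maximum_yogurt maximum_yogurt maximum_yogurt_alt
  set L := PySem.List.sorted A (fun x => x) false with hL
  rw [pvFold_eq]
  by_cases hn : n ≤ 0
  · rw [pvOuter_notlt _ _ _ _ _ _ _ (by omega), pvBLoop_notlt _ _ _ _ _ _ _ (by omega)]
  · have hlen : (L.length : Int) = (A.length : Int) := by
      rw [hL, PySem.List.length_sorted]
    rcases hpre with h | ⟨hk, hnlen⟩
    · omega
    have hnL : n ≤ (L.length : Int) := by omega
    have hM : ∀ a ∈ L, a ≤ (2147483648 : Int) := by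
      intro a ha
      rw [hL, PySem.List.mem_sorted] at ha
      unfold Dom_maximum_yogurt at hdom
      simp only [Bool.and_eq_true, List.all_eq_true, pvDomInt, decide_eq_true_eq] at hdom
      exact (hdom.2 a ha).2
    have hnb : n ≤ 2147483648 := by
      unfold Dom_maximum_yogurt at hdom
      simp only [Bool.and_eq_true, List.all_eq_true, pvDomInt, decide_eq_true_eq] at hdom
      exact hdom.1.1.2
    have hfuel : (n - 0) + ((2147483648 : Int) + 1 - 0) < ((2 ^ 33 + n.toNat : Nat) : Int) := by
      push_cast; omega
    rcases eq_or_lt_of_le hk with rfl | hk1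
    · rw [pvOuter_zero_k n 2147483648 L hnL hM _ 0 0 0 (le_refl 0) (by omega) hfuel,
        pvBLoop_zero]
    · exact pvSim n k 2147483648 L (by omega) hnL
        (by rw [hL]; exact PySem.List.sorted_pairwise A (fun x => x)) hM _ 0 0 0
        (le_refl 0) (by omega) hfuel
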